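-- pv_equiv track=rewrite | github.com/sophiahexj/paperbirthdays | scripts/ingest_papers.py | normalize_field
-- ===== SOURCE A (Python) =====
-- from typing import List, Dict, Optional
--
-- def normalize_field(fields_of_study: List[str]) -> str:
--     """Map diverse field names to canonical categories"""
--     if not fields_of_study:
--         return 'Other'
--
--     field_mapping = {
--         'Computer Science': ['Computer Science', 'CS'],
--         'Economics': ['Economics', 'Business'],
--         'Physics': ['Physics', 'Astronomy', 'Astrophysics'],
--         'Biology': ['Biology', 'Medicine', 'Biochemistry', 'Genetics'],
--         'Mathematics': ['Mathematics', 'Statistics'],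
--         'Psychology': ['Psychology', 'Cognitive Science'],
--         'Engineering': ['Engineering'],
--         'Chemistry': ['Chemistry', 'Materials Science'],
--         'Environmental Science': ['Environmental Science', 'Geology', 'Geography'],
--         'Political Science': ['Political Science', 'Sociology'],
--         'Philosophy': ['Philosophy'],
--         'History': ['History'],
--         'Art': ['Art'],
--     }
--
--     for canonical, variants in field_mapping.items():
--         if any(f in fields_of_study for f in variants):
--             return canonical
--
--     return fields_of_study[0] if fields_of_study else 'Other'
-- ===== SOURCE B (Python) =====
-- # Same mapping inverted once: variant -> (priority index, canonical); one pass over the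
-- # input keeping the match with the smallest priority index.
-- _REVERSE = {
--     'Computer Science': (0, 'Computer Science'), 'CS': (0, 'Computer Science'),
--     'Economics': (1, 'Economics'), 'Business': (1, 'Economics'),
--     'Physics': (2, 'Physics'), 'Astronomy': (2, 'Physics'), 'Astrophysics': (2, 'Physics'),
--     'Biology': (3, 'Biology'), 'Medicine': (3, 'Biology'), 'Biochemistry': (3, 'Biology'), 'Genetics': (3, 'Biology'),
--     'Mathematics': (4, 'Mathematics'), 'Statistics': (4, 'Mathematics'),
--     'Psychology': (5, 'Psychology'), 'Cognitive Science': (5, 'Psychology'),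
--     'Engineering': (6, 'Engineering'),
--     'Chemistry': (7, 'Chemistry'), 'Materials Science': (7, 'Chemistry'),
--     'Environmental Science': (8, 'Environmental Science'), 'Geology': (8, 'Environmental Science'), 'Geography': (8, 'Environmental Science'),
--     'Political Science': (9, 'Political Science'), 'Sociology': (9, 'Political Science'),
--     'Philosophy': (10, 'Philosophy'),
--     'History': (11, 'History'),
--     'Art': (12, 'Art'),
-- }
--
-- def normalize_field(fields_of_study):
--     """Map diverse field names to canonical categories"""
--     if not fields_of_study:
--         return 'Other'
--     best = None
--     for f in fields_of_study:
--         entry = _REVERSE.get(f)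
--         if entry is not None and (best is None or entry[0] < best[0]):
--             best = entry
--     return best[1] if best is not None else fields_of_study[0]
-- ===== Notes on version B (the rewrite author's own statement) =====
-- stated objective: faster
-- what changed: Replaces the per-category scans of the input list (any(f in fields_of_study) for each of 13 categories, each an O(n) list membership) with a precomputed reverse dict variant->(priority,canonical) and a single pass over the input fields keeping the smallest priority index.
import Mathlib
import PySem

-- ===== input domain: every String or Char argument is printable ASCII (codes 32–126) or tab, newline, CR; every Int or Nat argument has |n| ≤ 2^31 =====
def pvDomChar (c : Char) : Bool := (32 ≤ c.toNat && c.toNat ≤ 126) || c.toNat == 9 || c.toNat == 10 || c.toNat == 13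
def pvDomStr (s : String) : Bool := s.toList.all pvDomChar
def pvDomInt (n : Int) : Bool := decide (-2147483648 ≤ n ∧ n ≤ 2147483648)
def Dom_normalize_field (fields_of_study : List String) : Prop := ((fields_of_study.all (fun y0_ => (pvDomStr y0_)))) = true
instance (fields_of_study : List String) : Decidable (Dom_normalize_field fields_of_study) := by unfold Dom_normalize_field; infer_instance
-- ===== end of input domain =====

-- B replaces A's per-category scans of the input with a precomputed reverse map
-- variant -> (priority, canonical) and a single pass keeping the smallest priority (alternative).

-- ===== PORT A =====
-- field_mapping dict in insertion order
def pvCats : List (String × List String) :=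
  [("Computer Science", ["Computer Science", "CS"]),
   ("Economics", ["Economics", "Business"]),
   ("Physics", ["Physics", "Astronomy", "Astrophysics"]),
   ("Biology", ["Biology", "Medicine", "Biochemistry", "Genetics"]),
   ("Mathematics", ["Mathematics", "Statistics"]),
   ("Psychology", ["Psychology", "Cognitive Science"]),
   ("Engineering", ["Engineering"]),
   ("Chemistry", ["Chemistry", "Materials Science"]),
   ("Environmental Science", ["Environmental Science", "Geology", "Geography"]),
   ("Political Science", ["Political Science", "Sociology"]),
   ("Philosophy", ["Philosophy"]),
   ("History", ["History"]),
   ("Art", ["Art"])]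

def normalize_field (fields_of_study : List String) : String :=
  if fields_of_study.isEmpty then "Other"
  else
    -- for canonical, variants in field_mapping.items(): if any(f in fields_of_study for f in variants): return canonical
    match pvCats.find? (fun cv => cv.2.any (fun f => fields_of_study.contains f)) with
    | some cv => cv.1
    | none =>
      -- return fields_of_study[0] if fields_of_study else 'Other'
      match fields_of_study with
      | [] => "Other"
      | f :: _ => f

-- ===== PORT B =====
-- the literal _REVERSE dict of Source B
def pvRevList : List (String × (Int × String)) :=
  [("Computer Science", (0, "Computer Science")), ("CS", (0, "Computer Science")),
   ("Economics", (1, "Economics")), ("Business", (1, "Economics")),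
   ("Physics", (2, "Physics")), ("Astronomy", (2, "Physics")), ("Astrophysics", (2, "Physics")),
   ("Biology", (3, "Biology")), ("Medicine", (3, "Biology")), ("Biochemistry", (3, "Biology")), ("Genetics", (3, "Biology")),
   ("Mathematics", (4, "Mathematics")), ("Statistics", (4, "Mathematics")),
   ("Psychology", (5, "Psychology")), ("Cognitive Science", (5, "Psychology")),
   ("Engineering", (6, "Engineering")),
   ("Chemistry", (7, "Chemistry")), ("Materials Science", (7, "Chemistry")),
   ("Environmental Science", (8, "Environmental Science")), ("Geology", (8, "Environmental Science")), ("Geography", (8, "Environmental Science")),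
   ("Political Science", (9, "Political Science")), ("Sociology", (9, "Political Science")),
   ("Philosophy", (10, "Philosophy")),
   ("History", (11, "History")),
   ("Art", (12, "Art"))]

def pvReverse : PySem.Dict String (Int × String) := PySem.Dict.mk pvRevList

-- loop body: entry = _REVERSE.get(f); if entry is not None and (best is None or entry[0] < best[0]): best = entry
def pvStep (best : Option (Int × String)) (f : String) : Option (Int × String) :=
  match pvReverse.get? f with
  | none => best
  | some e =>
    match best with
    | none => some e
    | some b => if e.1 < b.1 then some e else some b

def normalize_field_alt (fields_of_study : List String) : String :=
  match fields_of_study with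
  | [] => "Other"
  | f0 :: _ =>
    match fields_of_study.foldl pvStep none with
    | some b => b.2
    | none => f0

-- ===== PRECONDITION & SPEC =====
def Spec_normalize_field (fields_of_study : List String) (out : String) : Prop := out = normalize_field_alt fields_of_study
instance (fields_of_study : List String) (out : String) : Decidable (Spec_normalize_field fields_of_study out) := by unfold Spec_normalize_field; infer_instance

-- ===== CLAIM (what is proved, stated in full; the proofs are below) =====
def Claim_equal_normalize_field : Prop := ∀ (fields_of_study : List String), Dom_normalize_field fields_of_study → Spec_normalize_field fields_of_study (normalize_field fields_of_study)

-- ===== LEMMAS AND PROOFS =====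

-- a value returned by get? on a literal dict is one of its pairs
lemma pvGet_mem (l : List (String × (Int × String))) (f : String) (p : Int × String)
    (h : (PySem.Dict.mk l).get? f = some p) : (f, p) ∈ l := by
  induction l with
  | nil => simp [PySem.Dict.get?] at h
  | cons hd tl ih =>
    obtain ⟨k, v⟩ := hd
    rw [PySem.Dict.get?_mk_cons] at h
    by_cases hk : k == f
    · simp [hk] at h
      subst h
      simp_all
    · simp [hk] at h
      exact List.mem_cons_of_mem _ (ih h)

-- every pair of the reverse map points back into pvCats at its priority index
lemma pvK1 : ∀ e ∈ pvRevList, (0:Int) ≤ e.2.1 ∧ e.2.1.toNat < pvCats.length ∧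
    (pvCats.getD e.2.1.toNat ("", [])).1 = e.2.2 ∧ e.1 ∈ (pvCats.getD e.2.1.toNat ("", [])).2 := by
  decide

-- every variant of category k maps to (k, canonical k) in the reverse dict
lemma pvK2 : ∀ k ∈ List.range pvCats.length, ∀ v ∈ (pvCats.getD k ("", [])).2,
    pvReverse.get? v = some ((k : Int), (pvCats.getD k ("", [])).1) := by
  decide

-- characterization of B's fold: none iff nothing matched (given empty acc), else the minimum-priority match
lemma pvFoldMin (fs : List String) : ∀ (acc : Option (Int × String)),
    (fs.foldl pvStep acc = none → acc = none ∧ ∀ f ∈ fs, pvReverse.get? f = none) ∧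
    (∀ r, fs.foldl pvStep acc = some r →
      (acc = some r ∨ ∃ f ∈ fs, pvReverse.get? f = some r) ∧
      (∀ b, acc = some b → r.1 ≤ b.1) ∧
      (∀ f ∈ fs, ∀ e, pvReverse.get? f = some e → r.1 ≤ e.1)) := by
  induction fs with
  | nil =>
    intro acc
    refine ⟨fun h => ⟨h, by simp⟩, fun r h => ?_⟩
    simp only [List.foldl_nil] at h
    subst h
    refine ⟨Or.inl rfl, fun b hb => ?_, by simp⟩
    injection hb with hb
    exact le_of_eq (by rw [hb])
  | cons f fs ih =>
    intro acc
    have IH := ih (pvStep acc f)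
    simp only [List.foldl_cons]
    constructor
    · intro h
      obtain ⟨h1, h2⟩ := IH.1 h
      cases hg : pvReverse.get? f with
      | none =>
        have hstep : pvStep acc f = acc := by unfold pvStep; rw [hg]
        rw [hstep] at h1
        exact ⟨h1, by intro x hx; rcases List.mem_cons.mp hx with rfl | hx; exact hg; exact h2 x hx⟩
      | some e =>
        exfalso
        have hne : pvStep acc f ≠ none := by
          cases acc with
          | none => simp [pvStep, hg]
          | some b0 => simp only [pvStep, hg]; split <;> simp
        exact hne h1
    · intro r h
      obtain ⟨hmem, hacc, hmin⟩ := IH.2 r h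
      cases hg : pvReverse.get? f with
      | none =>
        have hstep : pvStep acc f = acc := by unfold pvStep; rw [hg]
        rw [hstep] at hmem hacc
        refine ⟨?_, hacc, ?_⟩
        · rcases hmem with h' | ⟨f', hf', hg'⟩
          · exact Or.inl h'
          · exact Or.inr ⟨f', List.mem_cons_of_mem _ hf', hg'⟩
        · intro x hx e he
          rcases List.mem_cons.mp hx with rfl | hx
          · rw [hg] at he; cases he
          · exact hmin x hx e he
      | some e =>
        cases acc with
        | none =>
          have hstep : pvStep none f = some e := by unfold pvStep; rw [hg]
          rw [hstep] at hmem hacc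
          have hre : r.1 ≤ e.1 := hacc e rfl
          refine ⟨?_, ?_, ?_⟩
          · rcases hmem with h' | ⟨f', hf', hg'⟩
            · cases h'; exact Or.inr ⟨f, List.mem_cons_self .., hg⟩
            · exact Or.inr ⟨f', List.mem_cons_of_mem _ hf', hg'⟩
          · intro b hb; cases hb
          · intro x hx e' he'
            rcases List.mem_cons.mp hx with rfl | hx
            · rw [hg] at he'; cases he'; exact hre
            · exact hmin x hx e' he'
        | some b0 =>
          by_cases hlt : e.1 < b0.1
          · have hstep : pvStep (some b0) f = some e := by unfold pvStep; rw [hg]; simp [hlt]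
            rw [hstep] at hmem hacc
            have hre : r.1 ≤ e.1 := hacc e rfl
            refine ⟨?_, ?_, ?_⟩
            · rcases hmem with h' | ⟨f', hf', hg'⟩
              · cases h'; exact Or.inr ⟨f, List.mem_cons_self .., hg⟩
              · exact Or.inr ⟨f', List.mem_cons_of_mem _ hf', hg'⟩
            · intro b hb; cases hb; omega
            · intro x hx e' he'
              rcases List.mem_cons.mp hx with rfl | hx
              · rw [hg] at he'; cases he'; exact hre
              · exact hmin x hx e' he'
          · have hstep : pvStep (some b0) f = some b0 := by unfold pvStep; rw [hg]; simp [hlt]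
            rw [hstep] at hmem hacc
            have hrb : r.1 ≤ b0.1 := hacc b0 rfl
            refine ⟨?_, ?_, ?_⟩
            · rcases hmem with h' | ⟨f', hf', hg'⟩
              · exact Or.inl (by rw [h'])
              · exact Or.inr ⟨f', List.mem_cons_of_mem _ hf', hg'⟩
            · intro b hb; cases hb; exact hrb
            · intro x hx e' he'
              rcases List.mem_cons.mp hx with rfl | hx
              · rw [hg] at he'; cases he'; omega
              · exact hmin x hx e' he'

-- ===== VERDICT (by name: the statement is the Claim_ definition above) =====
theorem normalize_field_spec : Claim_equal_normalize_field := by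
  unfold Claim_equal_normalize_field Spec_normalize_field
  intro fs _
  cases fs with
  | nil => rfl
  | cons f0 rest =>
    simp only [normalize_field, normalize_field_alt, List.isEmpty_cons, Bool.false_eq_true,
      if_false]
    cases hres : (f0 :: rest).foldl pvStep none with
    | none =>
      have hall := ((pvFoldMin (f0 :: rest) none).1 hres).2
      have hfind : pvCats.find? (fun cv => cv.2.any (fun f => (f0 :: rest).contains f)) = none := by
        rw [List.find?_eq_none]
        intro cv hcv hpred
        simp only [List.any_eq_true] at hpred
        obtain ⟨v, hv, hvin⟩ := hpred
        obtain ⟨k, hk, hEq⟩ := List.mem_iff_getElem.mp hcv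
        have h2 := pvK2 k (List.mem_range.mpr hk) v
          (by rw [List.getD_eq_getElem _ _ hk, hEq]; exact hv)
        have h3 := hall v (by simpa using hvin)
        rw [h3] at h2
        cases h2
      rw [hfind]
    | some r =>
      obtain ⟨hmem, _, hmin⟩ := (pvFoldMin (f0 :: rest) none).2 r hres
      obtain ⟨f, hf, hgf⟩ := hmem.resolve_left (by simp)
      obtain ⟨hpos, hlt, hcanon, hvar⟩ := pvK1 (f, r) (pvGet_mem _ _ _ hgf)
      have hfind : pvCats.find? (fun cv => cv.2.any (fun g => (f0 :: rest).contains g)) =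
          some (pvCats[r.1.toNat]'hlt) := by
        rw [List.find?_eq_some_iff_getElem]
        refine ⟨?_, r.1.toNat, hlt, rfl, ?_⟩
        · simp only [List.any_eq_true]
          refine ⟨f, ?_, by simpa using hf⟩
          rw [← List.getD_eq_getElem _ ("", []) hlt]
          exact hvar
        · intro j hj
          simp only [Bool.not_eq_eq_eq_not, Bool.not_true, List.any_eq_false]
          intro v hv
          by_contra hvin
          have h2 := pvK2 j (List.mem_range.mpr (lt_trans hj hlt)) v
            (by rw [List.getD_eq_getElem _ _ (lt_trans hj hlt)]; exact hv)
          have h3 := hmin v (by simpa using hvin) _ h2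
          omega
      rw [hfind]
      show (pvCats[r.1.toNat]'hlt).1 = r.2
      rw [← List.getD_eq_getElem pvCats ("", []) hlt]
      exact hcanon
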